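-- pv_equiv track=rewrite | github.com/tommccoy1/tpdn | role_assignment_functions.py | interleave_index
-- ===== SOURCE A (Python) =====
-- def interleave_index(length):
-- 	positions = range(length)
-- 	start_ind = 0
-- 	end_ind = length - 1
--
-- 	start = True
-- 	to_fill = [0 for _ in positions]
-- 	for elt in positions:
-- 		if start:
-- 			to_fill[start_ind] = elt
-- 			start_ind += 1
-- 			start = False
-- 		else:
-- 			to_fill[end_ind] = elt
-- 			end_ind -= 1
-- 			start = True
-- 	return to_fill
-- ===== SOURCE B (Python) =====
-- def interleave_index(length):
-- 	evens = list(range(0, length, 2))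
-- 	odds = list(range(1, length, 2))
-- 	return evens + odds[::-1]
-- ===== Notes on version B (the rewrite author's own statement) =====
-- stated objective: simpler
-- what changed: Replaces the alternating two-pointer fill into a preallocated list by a direct construction: the even indices form the front stride range(0,length,2) and the odd indices, placed right-to-left by A's back pointer, are range(1,length,2) reversed, so B is one concatenation of two strided ranges.
import Mathlib
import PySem

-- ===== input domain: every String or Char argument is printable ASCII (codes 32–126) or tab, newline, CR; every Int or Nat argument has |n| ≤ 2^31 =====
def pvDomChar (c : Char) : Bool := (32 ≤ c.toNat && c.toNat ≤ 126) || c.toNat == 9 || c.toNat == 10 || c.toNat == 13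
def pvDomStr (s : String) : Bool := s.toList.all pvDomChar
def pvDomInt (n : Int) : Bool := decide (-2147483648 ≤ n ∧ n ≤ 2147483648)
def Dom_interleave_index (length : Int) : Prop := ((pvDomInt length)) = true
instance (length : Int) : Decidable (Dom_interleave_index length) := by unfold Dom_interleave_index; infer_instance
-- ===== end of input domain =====

-- B replaces A's alternating two-pointer fill with one concatenation of two strided
-- ranges (evens forward, odds reversed); objective: simpler.

-- ===== PORT A =====
-- loop body of A: one iteration of the for-loop over (to_fill, start_ind, end_ind, start)
def iiStep (s : List Int × Int × Int × Bool) (elt : Int) : List Int × Int × Int × Bool :=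
  match s with
  | (to_fill, start_ind, end_ind, start) =>
    if start then
      (PySem.List.pySetD to_fill start_ind elt, start_ind + 1, end_ind, false)
    else
      (PySem.List.pySetD to_fill end_ind elt, start_ind, end_ind - 1, true)

def interleave_index (length : Int) : List Int :=
  let positions := PySem.List.pyRange 0 length 1
  let to_fill := positions.map (fun _ => (0 : Int))
  (positions.foldl iiStep (to_fill, 0, length - 1, true)).1

-- ===== PORT B =====
def interleave_index_alt (length : Int) : List Int :=
  let evens := PySem.List.pyRange 0 length 2
  let odds := PySem.List.pyRange 1 length 2
  evens ++ odds.reverse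

-- ===== PRECONDITION & SPEC =====
def Spec_interleave_index (length : Int) (out : List Int) : Prop := out = interleave_index_alt length
instance (length : Int) (out : List Int) : Decidable (Spec_interleave_index length out) := by unfold Spec_interleave_index; infer_instance

-- ===== CLAIM (what is proved, stated in full; the proofs are below) =====
def Claim_equal_interleave_index : Prop := ∀ (length : Int), Dom_interleave_index length → Spec_interleave_index length (interleave_index length)

-- ===== LEMMAS AND PROOFS =====

-- the even indices placed by A's front pointer, and the odd indices placed by its back pointer
def iiEvens (k : Nat) : List Int := (List.range ((k+1)/2)).map (fun i => ((2*i : Nat) : Int))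
def iiOdds  (k : Nat) : List Int := (List.range (k/2)).map (fun i => ((2*i+1 : Nat) : Int))

lemma ii_set_append_cons (l1 l2 : List Int) (x v : Int) (j : Nat) (h : j = l1.length) :
    (l1 ++ x :: l2).set j v = l1 ++ v :: l2 := by
  subst h
  induction l1 with
  | nil => simp
  | cons a t ih => simp [ih]

-- loop invariant: state of A's fold after processing elements 0..k-1 of range(n)
lemma ii_inv (n k : Nat) (hk : k ≤ n) :
    (PySem.List.pyRange 0 (k:Int) 1).foldl iiStep
        (List.replicate n (0:Int), 0, (n:Int) - 1, true)
    = (iiEvens k ++ List.replicate (n-k) (0:Int) ++ (iiOdds k).reverse,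
       (((k+1)/2 : Nat) : Int), (n:Int) - 1 - ((k/2 : Nat) : Int), decide (k % 2 = 0)) := by
  induction k with
  | zero => simp [PySem.List.pyRange_one_eq_nil, iiEvens, iiOdds]
  | succ k ih =>
    have hk' : k ≤ n := Nat.le_of_succ_le hk
    have hcast : ((k+1 : Nat) : Int) = (k : Int) + 1 := by push_cast; ring
    rw [hcast, PySem.List.pyRange_one_succ_right (by positivity), List.foldl_append,
        ih hk']
    simp only [List.foldl_cons, List.foldl_nil]
    rcases Nat.even_or_odd k with he | ho
    · -- k even: front pointer places k at index (k+1)/2 = |iiEvens k|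
      obtain ⟨m, hm⟩ := he
      subst hm
      have h2 : (m+m+1)/2 = m := by omega
      have h3 : (m+m+1+1)/2 = m+1 := by omega
      have hflag : decide ((m + m) % 2 = 0) = true := by simp; omega
      rw [hflag]
      simp only [iiStep, if_true, Prod.mk.injEq]
      refine ⟨?_, ?_, ?_, ?_⟩
      · -- list component
        have hlenE : (iiEvens (m+m)).length = m := by simp [iiEvens]; omega
        have hz : List.replicate (n-(m+m)) (0:Int) = 0 :: List.replicate (n-(m+m)-1) 0 := by
          rw [← List.replicate_succ]; congr 1; omega
        have hE : iiEvens (m+m+1) = iiEvens (m+m) ++ [((m+m : Nat) : Int)] := by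
          unfold iiEvens
          have h4 : 2*m = m+m := by omega
          rw [h2, h3, List.range_succ, List.map_append, List.map_singleton, h4]
        have hO : iiOdds (m+m+1) = iiOdds (m+m) := by
          have : (m+m+1)/2 = (m+m)/2 := by omega
          unfold iiOdds; rw [this]
        rw [h2, PySem.List.pySetD_natCast, hz, hE, hO]
        have hz2 : n - (m+m+1) = n - (m+m) - 1 := by omega
        rw [hz2, List.append_assoc, List.cons_append, ii_set_append_cons _ _ _ _ _ hlenE.symm]
        simp
      · omega
      · omega
      · simp; omega
    · -- k odd: back pointer places k at index n - 1 - k/2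
      obtain ⟨m, hm⟩ := ho
      subst hm
      have h2 : (2*m+1)/2 = m := by omega
      have h3 : (2*m+1+1)/2 = m+1 := by omega
      have hflag : decide ((2*m+1) % 2 = 0) = false := by simp
      rw [hflag]
      simp only [iiStep, Bool.false_eq_true, if_false, Prod.mk.injEq]
      refine ⟨?_, ?_, ?_, ?_⟩
      · -- list component
        have hlenE : (iiEvens (2*m+1)).length = m + 1 := by simp [iiEvens]; omega
        have hsplit : List.replicate (n-(2*m+1)) (0:Int)
            = List.replicate (n-(2*m+1)-1) (0:Int) ++ [(0:Int)] := by
          rw [← List.replicate_succ']; congr 1; omega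
        have hO : iiOdds (2*m+1+1) = iiOdds (2*m+1) ++ [((2*m+1 : Nat) : Int)] := by
          unfold iiOdds
          rw [h2, h3, List.range_succ, List.map_append, List.map_singleton]
        have hE2 : iiEvens (2*m+1+1) = iiEvens (2*m+1) := by
          have : (2*m+1+1+1)/2 = (2*m+1+1)/2 := by omega
          unfold iiEvens; rw [this]
        have hidxcast : (n:Int) - 1 - (((2*m+1)/2 : Nat) : Int) = ((n - 1 - m : Nat) : Int) := by
          rw [h2]; omega
        have hlenpre : ((iiEvens (2*m+1)) ++ List.replicate (n-(2*m+1)-1) (0:Int)).length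
            = n - 1 - m := by
          simp [hlenE]; omega
        rw [hidxcast, PySem.List.pySetD_natCast, hsplit, hO, hE2]
        have hz2 : n - (2*m+1+1) = n - (2*m+1) - 1 := by omega
        rw [hz2]
        have hre : iiEvens (2*m+1) ++ (List.replicate (n-(2*m+1)-1) (0:Int) ++ [(0:Int)]) ++ (iiOdds (2*m+1)).reverse
            = (iiEvens (2*m+1) ++ List.replicate (n-(2*m+1)-1) (0:Int)) ++ ((0:Int) :: (iiOdds (2*m+1)).reverse) := by
          simp
        rw [hre, ii_set_append_cons _ _ _ _ _ hlenpre.symm]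
        simp
      · omega
      · omega
      · simp; omega

lemma ii_main (n : Nat) : interleave_index (n : Int) = interleave_index_alt (n : Int) := by
  unfold interleave_index interleave_index_alt
  have hfill : (PySem.List.pyRange 0 (n:Int) 1).map (fun _ => (0:Int)) = List.replicate n (0:Int) := by
    rw [List.map_const']
    congr 1
    rw [PySem.List.length_pyRange_one]
    omega
  simp only [hfill]
  rw [ii_inv n n le_rfl]
  have hEv : PySem.List.pyRange 0 (n:Int) 2 = iiEvens n := by
    rw [PySem.List.pyRange_of_pos 0 (n:Int) (by norm_num)]
    unfold iiEvens
    rcases Nat.eq_zero_or_pos n with h0 | hpos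
    · subst h0; simp
    · rw [if_pos (by exact_mod_cast hpos)]
      have : (((n:Int) - 0 + 2 - 1) / 2).toNat = (n+1)/2 := by omega
      rw [this]
      apply List.map_congr_left
      intro k _
      push_cast; ring
  have hOd : PySem.List.pyRange 1 (n:Int) 2 = iiOdds n := by
    rw [PySem.List.pyRange_of_pos 1 (n:Int) (by norm_num)]
    unfold iiOdds
    by_cases h1 : (1:Int) < (n:Int)
    · rw [if_pos h1]
      have : (((n:Int) - 1 + 2 - 1) / 2).toNat = n/2 := by omega
      rw [this]
      apply List.map_congr_left
      intro k _
      push_cast; ring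
    · rw [if_neg h1]
      have : n/2 = 0 := by omega
      rw [this]; simp
  rw [hEv, hOd]
  simp

-- ===== VERDICT (by name: the statement is the Claim_ definition above) =====
theorem interleave_index_spec : Claim_equal_interleave_index := by
  intro length _
  unfold Spec_interleave_index
  by_cases hpos : 0 ≤ length
  · obtain ⟨n, rfl⟩ := Int.eq_ofNat_of_zero_le hpos
    exact ii_main n
  · have hneg : length < 0 := by omega
    unfold interleave_index interleave_index_alt
    rw [PySem.List.pyRange_one_eq_nil (by omega),
        PySem.List.pyRange_of_pos 0 length (by norm_num),
        PySem.List.pyRange_of_pos 1 length (by norm_num),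
        if_neg (by omega), if_neg (by omega)]
    simp
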